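-- pv_equiv track=rewrite | github.com/fhennig/DiachronicPeopleEmbeddings | src/fht20/train_data_builder.py | sum_2d_dicts
-- ===== SOURCE A (Python) =====
-- from collections import defaultdict, Counter
-- from typing import List, Tuple, Dict, Any, Optional
--
-- def sum_2d_dicts(dicts: List[Dict[int, Dict[int, int]]]):
--     res = defaultdict(lambda: defaultdict(lambda: 0))
--     for d in dicts:
--         for i1, others in d.items():
--             for i2, v in others.items():
--                 res[i1][i2] += v
--     res = {k: dict(v) for k, v in res.items()}
--     return res
-- ===== SOURCE B (Python) =====
-- def _merge_inner(m1, m2):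
--     """Elementwise sum of two flat dicts: keys of m1 first, then new keys of m2."""
--     out = {k: v + m2.get(k, 0) for k, v in m1.items()}
--     for k, v in m2.items():
--         if k not in m1:
--             out[k] = v
--     return out
--
--
-- def _merge_outer(d1, d2):
--     """Merge two nested dicts, summing inner dicts key-by-key."""
--     out = {k: _merge_inner(v, d2.get(k, {})) for k, v in d1.items()}
--     for k, v in d2.items():
--         if k not in d1:
--             out[k] = v
--     return out
--
--
-- def sum_2d_dicts(dicts):
--     # Pairwise binary merge, folding the list of dicts from the right;
--     # empty inner dicts carry no entries, so they are stripped first.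
--     res = {}
--     for d in reversed(dicts):
--         res = _merge_outer({k: v for k, v in d.items() if v}, res)
--     return res
-- ===== Notes on version B (the rewrite author's own statement) =====
-- stated objective: alternative
-- what changed: A accumulates every (i1,i2,v) entry one by one into a nested defaultdict in a single triple-nested pass; B instead folds the list of dicts from the right with a binary whole-dict merge built from dict comprehensions (elementwise inner merge, then outer merge), never maintaining an elementwise accumulator.
import Mathlib
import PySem

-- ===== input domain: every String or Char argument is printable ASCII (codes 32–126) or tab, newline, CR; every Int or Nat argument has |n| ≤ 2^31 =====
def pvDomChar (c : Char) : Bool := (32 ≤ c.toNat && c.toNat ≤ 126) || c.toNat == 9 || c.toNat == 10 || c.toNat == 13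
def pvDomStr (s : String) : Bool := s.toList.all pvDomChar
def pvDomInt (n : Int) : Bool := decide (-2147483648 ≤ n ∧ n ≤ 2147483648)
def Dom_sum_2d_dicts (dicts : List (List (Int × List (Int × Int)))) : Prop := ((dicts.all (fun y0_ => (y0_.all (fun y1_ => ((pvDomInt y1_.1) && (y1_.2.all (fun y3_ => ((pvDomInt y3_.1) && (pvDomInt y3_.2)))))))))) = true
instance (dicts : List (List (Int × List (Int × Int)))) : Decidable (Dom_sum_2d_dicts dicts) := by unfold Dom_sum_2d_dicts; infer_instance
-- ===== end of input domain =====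

-- B replaces A's elementwise accumulation into a nested defaultdict by a right fold of a
-- binary whole-dict merge built from dict comprehensions (objective: alternative, same task).

-- ===== PORT A =====
-- res[i1][i2] += v on the nested defaultdict is Dict.modify at i1 (default empty dict)
-- with Dict.modify at i2 (default 0) inside; the final {k: dict(v)} comprehension is the
-- conversion of the nested Dict to the association-list return value.
def sum_2d_dicts (dicts : List (List (Int × List (Int × Int)))) : List (Int × List (Int × Int)) :=
  ((dicts.foldl
    (fun res d => d.foldl
      (fun res p => p.2.foldl
        (fun res q => res.modify p.1 PySem.Dict.empty (fun inn => inn.modify q.1 0 (· + q.2)))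
        res)
      res)
    (PySem.Dict.empty : PySem.Dict Int (PySem.Dict Int Int))).items).map
    (fun kv => (kv.1, kv.2.items))

-- ===== PORT B =====
-- m.get(k, z) on an association list: value of the first pair with key k, else z.
def pvGet {ν : Type} (z : ν) (m : List (Int × ν)) (k : Int) : ν :=
  ((m.find? (fun p => p.1 == k)).map (·.2)).getD z

-- _merge_inner: dict comprehension over m1 (each value summed with m2.get(k, 0)),
-- then the entries of m2 whose key is not in m1, appended in order.
def mergeInner (m1 m2 : List (Int × Int)) : List (Int × Int) :=
  m1.map (fun p => (p.1, p.2 + pvGet 0 m2 p.1)) ++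
    m2.filter (fun p => !(m1.any (fun q => q.1 == p.1)))

-- _merge_outer: same shape one level up, combining inner dicts with _merge_inner.
def mergeOuter (d1 d2 : List (Int × List (Int × Int))) : List (Int × List (Int × Int)) :=
  d1.map (fun p => (p.1, mergeInner p.2 (pvGet [] d2 p.1))) ++
    d2.filter (fun p => !(d1.any (fun q => q.1 == p.1)))

-- the reversed-iteration loop 'for d in reversed(dicts): res = _merge_outer({k: v for k, v in d.items() if v}, res)'
def sum_2d_dicts_alt (dicts : List (List (Int × List (Int × Int)))) : List (Int × List (Int × Int)) :=
  dicts.foldr (fun d res => mergeOuter (d.filter (fun p => !p.2.isEmpty)) res) []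

-- ===== PRECONDITION & SPEC =====
-- Pre_ excludes association lists carrying a duplicate key inside one (outer or inner) dict:
-- such lists do not encode any Python dict, so Python's sum_2d_dicts is never called on them.
def Pre_sum_2d_dicts (dicts : List (List (Int × List (Int × Int)))) : Prop :=
  ∀ d ∈ dicts, (d.map (·.1)).Nodup ∧ ∀ p ∈ d, (p.2.map (·.1)).Nodup
instance (dicts : List (List (Int × List (Int × Int)))) : Decidable (Pre_sum_2d_dicts dicts) := by
  unfold Pre_sum_2d_dicts; infer_instance

def pvWitness_sum_2d_dicts : (List (List (Int × List (Int × Int)))) :=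
  [[(1, [(2, 3)])], [(1, [(2, 4), (5, 6)])]]

def Spec_sum_2d_dicts (dicts : List (List (Int × List (Int × Int)))) (out : List (Int × List (Int × Int))) : Prop := out = sum_2d_dicts_alt dicts
instance (dicts : List (List (Int × List (Int × Int)))) (out : List (Int × List (Int × Int))) : Decidable (Spec_sum_2d_dicts dicts out) := by unfold Spec_sum_2d_dicts; infer_instance

-- ===== CLAIM (what is proved, stated in full; the proofs are below) =====
def Claim_equal_sum_2d_dicts : Prop := ∀ (dicts : List (List (Int × List (Int × Int)))), Dom_sum_2d_dicts dicts → Pre_sum_2d_dicts dicts → Spec_sum_2d_dicts dicts (sum_2d_dicts dicts)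

-- ===== LEMMAS AND PROOFS =====

-- the generic merge both mergeInner and mergeOuter instantiate (op = value combination, z = its unit)
def pvMerge {ν : Type} (op : ν → ν → ν) (z : ν) (m1 m2 : List (Int × ν)) : List (Int × ν) :=
  m1.map (fun p => (p.1, op p.2 (pvGet z m2 p.1))) ++
    m2.filter (fun p => !(m1.any (fun q => q.1 == p.1)))

theorem mergeInner_eq : mergeInner = pvMerge (fun a b => a + b) 0 := rfl

theorem pvGet_not_mem {ν : Type} (z : ν) (m : List (Int × ν)) (k : Int)
    (h : k ∉ m.map (·.1)) : pvGet z m k = z := by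
  
  have : m.find? (fun p => p.1 == k) = none := by
    apply List.find?_eq_none.mpr
    intro p hp
    simp only [beq_iff_eq]
    intro hk
    exact h (hk ▸ List.mem_map_of_mem hp)
  simp [pvGet, this]

theorem pvMerge_nil_right {ν : Type} (op : ν → ν → ν) (z : ν)
    (hz : ∀ v, op v z = v) (m : List (Int × ν)) : pvMerge op z m [] = m := by
  
  simp only [pvMerge, List.filter_nil, List.append_nil]
  have : ∀ p : Int × ν, (p.1, op p.2 (pvGet z [] p.1)) = p := by
    intro p; simp [pvGet, hz]
  simp [this]

theorem pvMerge_nil_left {ν : Type} (op : ν → ν → ν) (z : ν) (m : List (Int × ν)) :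
    pvMerge op z [] m = m := by
  
  simp [pvMerge]


theorem find?_filter_notin {μ ν : Type} (a : List (Int × μ)) (c : List (Int × ν)) (k : Int)
    (ha : a.any (fun q => q.1 == k) = false) :
    (c.filter (fun p => !(a.any (fun q => q.1 == p.1)))).find? (fun p => p.1 == k)
      = c.find? (fun p => p.1 == k) := by
  induction c with
  | nil => rfl
  | cons p t ih =>
    rw [List.filter_cons]
    by_cases hk : p.1 = k
    · have hpred : (!(a.any (fun q => q.1 == p.1))) = true := by
        rw [show p.1 = k from hk, ha]; rfl
      rw [if_pos hpred, List.find?_cons_of_pos (by simp [hk]), List.find?_cons_of_pos (by simp [hk])]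
    · cases hpred : (!(a.any fun q => q.1 == p.1)) with
      | true =>
        rw [if_pos rfl, List.find?_cons_of_neg (by simp [hk]), List.find?_cons_of_neg (by simp [hk]), ih]
      | false =>
        rw [if_neg (by simp), ih, List.find?_cons_of_neg (by simp [hk])]

theorem any_eq_false_of_find?_none {ν : Type} (b : List (Int × ν)) (k : Int)
    (hb : b.find? (fun p => p.1 == k) = none) : b.any (fun q => q.1 == k) = false := by
  cases hany : b.any (fun q => q.1 == k) with
  | false => rfl
  | true =>
    obtain ⟨p, hp, hpk⟩ := List.any_eq_true.mp hany
    exact absurd hpk (List.find?_eq_none.mp hb p hp)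

-- keys of a merge = union of the keys
theorem any_pvMerge {ν : Type} (op : ν → ν → ν) (z : ν) (a b : List (Int × ν)) (k : Int) :
    (pvMerge op z a b).any (fun q => q.1 == k)
      = (a.any (fun q => q.1 == k) || b.any (fun q => q.1 == k)) := by
  
  apply Bool.eq_iff_iff.mpr
  simp only [pvMerge, List.any_append, Bool.or_eq_true, List.any_eq_true, List.mem_map,
    List.mem_filter, beq_iff_eq]
  constructor
  · rintro (⟨x, ⟨p, hp, rfl⟩, hk⟩ | ⟨p, ⟨hp, _⟩, hk⟩)
    · exact Or.inl ⟨p, hp, hk⟩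
    · exact Or.inr ⟨p, hp, hk⟩
  · rintro (⟨p, hp, hk⟩ | ⟨p, hp, hk⟩)
    · exact Or.inl ⟨_, ⟨p, hp, rfl⟩, hk⟩
    · by_cases ha : a.any (fun q => q.1 == k) = true
      · obtain ⟨q, hq, hqk⟩ := List.any_eq_true.mp ha
        exact Or.inl ⟨_, ⟨q, hq, rfl⟩, by simpa using hqk⟩
      · refine Or.inr ⟨p, ⟨hp, ?_⟩, hk⟩
        have ha' : a.any (fun q => q.1 == k) = false := Bool.eq_false_iff.mpr ha
        rw [hk, ha']; rfl

-- lookup distributes over the merge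
theorem pvGet_pvMerge {ν : Type} (op : ν → ν → ν) (z : ν)
    (hzl : ∀ v, op z v = v) (b c : List (Int × ν)) (k : Int) :
    pvGet z (pvMerge op z b c) k = op (pvGet z b k) (pvGet z c k) := by
  
  rcases hb : b.find? (fun p => p.1 == k) with _ | p
  · have hbf : b.any (fun q => q.1 == k) = false := any_eq_false_of_find?_none b k hb
    have hmap : ((b.map (fun p => (p.1, op p.2 (pvGet z c p.1)))).find? (fun q => q.1 == k)) = none := by
      rw [List.find?_map]
      show (b.find? (fun p => p.1 == k)).map _ = none
      rw [hb]; rfl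
    have heq : pvGet z (pvMerge op z b c) k = pvGet z c k := by
      show ((((b.map (fun p => (p.1, op p.2 (pvGet z c p.1)))) ++
          (c.filter (fun p => !(b.any (fun q => q.1 == p.1))))).find?
          (fun p => p.1 == k)).map (·.2)).getD z = pvGet z c k
      rw [List.find?_append, hmap, Option.none_or, find?_filter_notin b c k hbf]
      rfl
    rw [heq]
    have hbz : pvGet z b k = z := by simp [pvGet, hb]
    rw [hbz, hzl]
  · have hp1 : p.1 = k := by simpa using List.find?_some hb
    have hmap : ((b.map (fun p => (p.1, op p.2 (pvGet z c p.1)))).find? (fun q => q.1 == k))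
        = some (p.1, op p.2 (pvGet z c p.1)) := by
      rw [List.find?_map]
      show (b.find? (fun p => p.1 == k)).map _ = _
      rw [hb]; rfl
    have hgb : pvGet z b k = p.2 := by simp [pvGet, hb]
    show ((((b.map (fun p => (p.1, op p.2 (pvGet z c p.1)))) ++
        (c.filter (fun p => !(b.any (fun q => q.1 == p.1))))).find?
        (fun p => p.1 == k)).map (·.2)).getD z = op (pvGet z b k) (pvGet z c k)
    rw [List.find?_append, hmap, Option.some_or]
    simp [hp1, hgb]

theorem filter_key_map {α ν ν' : Type} (a : List (Int × α)) (f : Int × ν → Int × ν')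
    (hf : ∀ p, (f p).1 = p.1) (l : List (Int × ν)) :
    (l.filter (fun p => !(a.any (fun q => q.1 == p.1)))).map f
      = (l.map f).filter (fun p => !(a.any (fun q => q.1 == p.1))) := by
  induction l with
  | nil => rfl
  | cons p t ih =>
    rw [List.filter_cons, List.map_cons, List.filter_cons, hf p]
    by_cases hp : (!(a.any fun q => q.1 == p.1)) = true
    · rw [if_pos hp, if_pos hp, List.map_cons, ih]
    · rw [if_neg hp, if_neg hp, ih]

theorem pvMerge_assoc {ν : Type} (op : ν → ν → ν) (z : ν)
    (hzl : ∀ v, op z v = v)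
    (hassoc : ∀ x y w, op (op x y) w = op x (op y w))
    (a b c : List (Int × ν)) :
    pvMerge op z (pvMerge op z a b) c = pvMerge op z a (pvMerge op z b c) := by
  
  have S1 : ∀ p : Int × ν, ((fun p : Int × ν => (p.1, op p.2 (pvGet z c p.1)))
        ((fun p : Int × ν => (p.1, op p.2 (pvGet z b p.1))) p))
      = (p.1, op p.2 (pvGet z (pvMerge op z b c) p.1)) := by
    intro p
    show (p.1, op (op p.2 (pvGet z b p.1)) (pvGet z c p.1)) = _
    rw [pvGet_pvMerge op z hzl, hassoc]
  have S2 := filter_key_map a (fun p : Int × ν => (p.1, op p.2 (pvGet z c p.1))) (fun p => rfl) b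
  have S3 : (c.filter (fun p => !((pvMerge op z a b).any (fun q => q.1 == p.1))))
      = ((c.filter (fun p => !(b.any (fun q => q.1 == p.1)))).filter
          (fun p => !(a.any (fun q => q.1 == p.1)))) := by
    rw [List.filter_filter]
    apply List.filter_congr
    intro p _
    rw [any_pvMerge]
    cases ha : a.any (fun q => q.1 == p.1) <;> cases hb : b.any (fun q => q.1 == p.1) <;> rfl
  show (a.map (fun p => (p.1, op p.2 (pvGet z b p.1)))
        ++ b.filter (fun p => !(a.any (fun q => q.1 == p.1)))).map
          (fun p => (p.1, op p.2 (pvGet z c p.1)))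
      ++ c.filter (fun p => !((pvMerge op z a b).any (fun q => q.1 == p.1)))
    = a.map (fun p => (p.1, op p.2 (pvGet z (pvMerge op z b c) p.1)))
      ++ (b.map (fun p => (p.1, op p.2 (pvGet z c p.1)))
          ++ c.filter (fun p => !(b.any (fun q => q.1 == p.1)))).filter
            (fun p => !(a.any (fun q => q.1 == p.1)))
  rw [List.map_append, List.map_map, List.filter_append, S2, S3, List.append_assoc]
  congr 1
  exact List.map_congr_left (fun p _ => S1 p)

theorem mergeInner_nil_right (m : List (Int × Int)) : mergeInner m [] = m := by
  
  rw [mergeInner_eq]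
  exact pvMerge_nil_right _ _ (fun v => by simp) m
theorem mergeInner_nil_left (m : List (Int × Int)) : mergeInner [] m = m := by
  
  rw [mergeInner_eq]
  exact pvMerge_nil_left _ _ m
theorem mergeInner_assoc (a b c : List (Int × Int)) :
    mergeInner (mergeInner a b) c = mergeInner a (mergeInner b c) := by
  
  rw [mergeInner_eq]
  exact pvMerge_assoc _ _ (fun v => by simp) (fun x y w => by rw [Int.add_assoc]) a b c

-- dict membership through its items list
theorem any_items_eq_contains {V : Type} (res : PySem.Dict Int V) (k : Int) :
    res.items.any (fun q => q.1 == k) = res.contains k := by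
  apply Bool.eq_iff_iff.mpr
  rw [List.any_eq_true, PySem.Dict.contains_iff_mem_keys]
  simp only [PySem.Dict.keys, List.mem_map, beq_iff_eq]

-- abbreviations for the two halves of pvMerge
def addT {ν : Type} (op : ν → ν → ν) (z : ν) (T : List (Int × ν)) : Int × ν → Int × ν :=
  fun q => (q.1, op q.2 (pvGet z T q.1))
def notIn {μ ν : Type} (X : List (Int × μ)) : Int × ν → Bool :=
  fun q => !(X.any (fun r => r.1 == q.1))

theorem pvMerge_eq {ν : Type} (op : ν → ν → ν) (z : ν) (X Y : List (Int × ν)) :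
    pvMerge op z X Y = X.map (addT op z Y) ++ Y.filter (notIn X) := rfl

theorem pvGet_cons {ν : Type} (z v : ν) (a k : Int) (T : List (Int × ν)) :
    pvGet z ((a, v) :: T) k = if (a == k) = true then v else pvGet z T k := by
  by_cases h : (a == k) = true
  · have hf : List.find? (fun p => p.1 == k) ((a, v) :: T) = some (a, v) :=
      List.find?_cons_of_pos h
    rw [if_pos h]
    simp [pvGet, hf]
  · have hf : List.find? (fun p => p.1 == k) ((a, v) :: T) = List.find? (fun p => p.1 == k) T :=
      List.find?_cons_of_neg h
    rw [if_neg h]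
    simp [pvGet, hf]

-- the generic bridge: a left fold of inserts combining old and new values, viewed through a
-- projection of the stored values, is the pvMerge of the projected items with the projected list
theorem gfold_items {V W ν : Type} (op : ν → ν → ν) (z : ν) (piV : V → ν) (piW : W → ν)
    (e : V) (comb : V → W → V) (Inv : V → Prop) (P : W → Prop)
    (hpe : piV e = z)
    (hcomb : ∀ v w, Inv v → P w → piV (comb v w) = op (piV v) (piW w))
    (hw0 : ∀ v, op v z = v) (hz0 : ∀ v, op z v = v)
    (hInvE : Inv e) (hInvC : ∀ v w, Inv v → P w → Inv (comb v w))
    (l : List (Int × W)) (res : PySem.Dict Int V)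
    (hl : (l.map (·.1)).Nodup) (hP : ∀ p ∈ l, P p.2)
    (hres : res.keys.Nodup) (hInvRes : ∀ kv ∈ res.items, Inv kv.2) :
    (l.foldl (fun res p => res.insert p.1 (comb (res.getD p.1 e) p.2)) res).items.map
        (fun kv => (kv.1, piV kv.2))
      = pvMerge op z (res.items.map (fun kv => (kv.1, piV kv.2)))
          (l.map (fun p => (p.1, piW p.2))) := by
  induction l generalizing res with
  | nil =>
    simp only [List.foldl_nil, List.map_nil]
    exact (pvMerge_nil_right op z hw0 _).symm
  | cons p t ih =>
    simp only [List.foldl_cons, List.map_cons]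
    have hl' : (t.map (·.1)).Nodup := (List.nodup_cons.mp hl).2
    have hane : p.1 ∉ t.map (·.1) := (List.nodup_cons.mp hl).1
    have haneT : p.1 ∉ (t.map (fun p => (p.1, piW p.2))).map (·.1) := by
      rw [List.map_map]; exact hane
    have hInvG : Inv (res.getD p.1 e) := by
      by_cases hc : res.contains p.1 = true
      · rcases hg : res.get? p.1 with _ | v
        · exact absurd ((PySem.Dict.get?_eq_none_iff_contains _ _).mp hg) (by simp [hc])
        · rw [PySem.Dict.getD_of_get?_eq_some res e hg]
          exact hInvRes (p.1, v) (PySem.Dict.mem_items_of_get?_eq_some res hg)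
      · rw [PySem.Dict.getD_of_not_contains res e (by simpa using hc)]
        exact hInvE
    have hres' : (res.insert p.1 (comb (res.getD p.1 e) p.2)).keys.Nodup :=
      PySem.Dict.nodup_keys_insert _ _ _ hres
    have hInv' : ∀ kv ∈ (res.insert p.1 (comb (res.getD p.1 e) p.2)).items, Inv kv.2 := by
      intro kv hkv
      rcases (PySem.Dict.mem_items_insert _ _ _ _).mp hkv with h | ⟨h, _⟩
      · rw [h]; exact hInvC _ _ hInvG (hP p (by simp))
      · exact hInvRes kv h
    rw [ih _ hl' (fun q hq => hP q (by simp [hq])) hres' hInv']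
    have hPp : P p.2 := hP p (by simp)
    have hTget : pvGet z (t.map (fun p => (p.1, piW p.2))) p.1 = z :=
      pvGet_not_mem z _ p.1 haneT
    by_cases hc : res.contains p.1 = true
    · -- p.1 already a key of res: the insert overwrites in place
      rw [pvMerge_eq, pvMerge_eq, PySem.Dict.items_insert_of_contains res _ hc]
      simp only [List.map_map]
      refine congrArg₂ (· ++ ·) ?_ ?_
      · apply List.map_congr_left
        intro kv hkv
        simp only [Function.comp]
        by_cases hk : (kv.1 == p.1) = true
        · have hk' : kv.1 = p.1 := by simpa using hk
          rw [if_pos hk]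
          show (p.1, op (piV (comb (res.getD p.1 e) p.2))
              (pvGet z (t.map (fun p => (p.1, piW p.2))) p.1)) = _
          rw [hTget, hw0, hcomb _ _ hInvG hPp]
          have hmem : (p.1, kv.2) ∈ res.items := by
            have : kv = (p.1, kv.2) := by rw [← hk']
            exact this ▸ hkv
          rw [PySem.Dict.getD_of_mem_items res hmem hres e]
          show _ = (kv.1, op (piV kv.2) (pvGet z ((p.1, piW p.2) :: t.map (fun p => (p.1, piW p.2))) kv.1))
          rw [pvGet_cons, if_pos (by simpa using hk'.symm), hk']
        · rw [if_neg hk]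
          show (kv.1, op (piV kv.2) (pvGet z (t.map (fun p => (p.1, piW p.2))) kv.1))
            = (kv.1, op (piV kv.2) (pvGet z ((p.1, piW p.2) :: t.map (fun p => (p.1, piW p.2))) kv.1))
          rw [pvGet_cons, if_neg (by simp; intro h; simp [h] at hk)]
      · rw [List.filter_cons]
        have hhead : (notIn (res.items.map (fun kv : Int × V => (kv.1, piV kv.2))) ((p.1, piW p.2) : Int × ν)) = false := by
          show (!((res.items.map (fun kv : Int × V => (kv.1, piV kv.2))).any (fun r => r.1 == p.1))) = false
          rw [List.any_map]
          have : ((fun (r : Int × ν) => r.1 == p.1) ∘ (fun kv : Int × V => (kv.1, piV kv.2))) = fun (kv : Int × V) => kv.1 == p.1 := rfl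
          rw [this, any_items_eq_contains, hc]
          rfl
        rw [if_neg (by simp [hhead])]
        apply List.filter_congr
        intro q _
        show (!((res.items.map ((fun kv : Int × V => (kv.1, piV kv.2)) ∘ fun q => if (q.1 == p.1) = true then (p.1, comb (res.getD p.1 e) p.2) else q)).any (fun r => r.1 == q.1)))
          = (!((res.items.map (fun kv : Int × V => (kv.1, piV kv.2))).any (fun r => r.1 == q.1)))
        rw [List.any_map, List.any_map]
        have : ((fun (r : Int × ν) => r.1 == q.1) ∘ ((fun kv : Int × V => (kv.1, piV kv.2)) ∘ fun q => if (q.1 == p.1) = true then (p.1, comb (res.getD p.1 e) p.2) else q))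
            = ((fun (r : Int × ν) => r.1 == q.1) ∘ (fun kv : Int × V => (kv.1, piV kv.2))) := by
          funext kv
          by_cases hk : (kv.1 == p.1) = true
          · have hk' : kv.1 = p.1 := by simpa using hk
            simp only [Function.comp]
            rw [if_pos hk, hk']
          · simp only [Function.comp]
            rw [if_neg hk]
        rw [this]
    · -- p.1 is a fresh key: the insert appends
      have hc' : res.contains p.1 = false := by simpa using hc
      rw [pvMerge_eq, pvMerge_eq, PySem.Dict.items_insert_of_not_contains res _ hc',
        List.map_append, List.map_append, List.filter_cons]
      have hhead : (notIn (res.items.map (fun kv : Int × V => (kv.1, piV kv.2))) ((p.1, piW p.2) : Int × ν)) = true := by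
        show (!((res.items.map (fun kv : Int × V => (kv.1, piV kv.2))).any (fun r => r.1 == p.1))) = true
        rw [List.any_map]
        have : ((fun (r : Int × ν) => r.1 == p.1) ∘ (fun kv : Int × V => (kv.1, piV kv.2))) = fun (kv : Int × V) => kv.1 == p.1 := rfl
        rw [this, any_items_eq_contains, hc']
        rfl
      rw [if_pos hhead]
      have hmid : ([(p.1, comb (res.getD p.1 e) p.2)].map (fun kv : Int × V => (kv.1, piV kv.2))).map
          (addT op z (t.map (fun p => (p.1, piW p.2)))) = [((p.1, piW p.2) : Int × ν)] := by
        show [(p.1, op (piV (comb (res.getD p.1 e) p.2)) (pvGet z (t.map (fun p => (p.1, piW p.2))) p.1))] = _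
        rw [hTget, hw0, PySem.Dict.getD_of_not_contains res e hc', hcomb _ _ hInvE hPp, hpe, hz0]
      rw [hmid]
      have hmap : (res.items.map (fun kv : Int × V => (kv.1, piV kv.2))).map (addT op z (t.map (fun p => (p.1, piW p.2))))
          = (res.items.map (fun kv : Int × V => (kv.1, piV kv.2))).map (addT op z ((p.1, piW p.2) :: t.map (fun p => (p.1, piW p.2)))) := by
        apply List.map_congr_left
        intro x hx
        obtain ⟨kv, hkv, rfl⟩ := List.mem_map.mp hx
        have hne : kv.1 ≠ p.1 := by
          intro h
          have : res.contains p.1 = true := (PySem.Dict.contains_iff_mem_keys _ _).mpr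
            (h ▸ (by simpa [PySem.Dict.keys] using List.mem_map_of_mem (f := (·.1)) hkv))
          rw [this] at hc'; exact absurd hc' (by simp)
        show (kv.1, op (piV kv.2) (pvGet z (t.map (fun p => (p.1, piW p.2))) kv.1))
          = (kv.1, op (piV kv.2) (pvGet z ((p.1, piW p.2) :: t.map (fun p => (p.1, piW p.2))) kv.1))
        rw [pvGet_cons, if_neg (by simpa using fun h => hne h.symm)]
      have hfil : (t.map (fun p => (p.1, piW p.2))).filter
            (notIn (res.items.map (fun kv : Int × V => (kv.1, piV kv.2)) ++ [(p.1, piV (comb (res.getD p.1 e) p.2))]))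
          = (t.map (fun p => (p.1, piW p.2))).filter (notIn (res.items.map (fun kv : Int × V => (kv.1, piV kv.2)))) := by
        apply List.filter_congr
        intro q hq
        have hqne : q.1 ≠ p.1 := by
          intro h
          apply haneT
          rw [← h]
          exact List.mem_map_of_mem (f := (·.1)) hq
        show (!((res.items.map (fun kv : Int × V => (kv.1, piV kv.2)) ++ [(p.1, piV (comb (res.getD p.1 e) p.2))]).any (fun r => r.1 == q.1)))
          = (!((res.items.map (fun kv : Int × V => (kv.1, piV kv.2))).any (fun r => r.1 == q.1)))
        rw [List.any_append]
        have : ([((p.1, piV (comb (res.getD p.1 e) p.2)) : Int × ν)].any (fun r => r.1 == q.1)) = false := by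
          simp only [List.any_cons, List.any_nil, Bool.or_false]
          simpa using fun h => hqne h.symm
        rw [this, Bool.or_false]
      simp only [List.map_cons, List.map_nil]
      rw [hfil, hmap, List.append_assoc, List.singleton_append]

-- keys of the accumulating dict stay distinct through the insert loop
theorem gfold_nodup {V W : Type} (e : V) (comb : V → W → V) (l : List (Int × W))
    (res : PySem.Dict Int V) (h : res.keys.Nodup) :
    (l.foldl (fun res p => res.insert p.1 (comb (res.getD p.1 e) p.2)) res).keys.Nodup := by
  induction l generalizing res with
  | nil => exact h
  | cons p t ih => exact ih _ (PySem.Dict.nodup_keys_insert _ _ _ h)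

-- a value invariant is preserved through the insert loop
theorem gfold_inv {V W : Type} (e : V) (comb : V → W → V) (Inv : V → Prop)
    (hInvE : Inv e) (hInvC : ∀ v w, Inv v → Inv (comb v w)) (l : List (Int × W))
    (res : PySem.Dict Int V) (hres : ∀ kv ∈ res.items, Inv kv.2) :
    ∀ kv ∈ (l.foldl (fun res p => res.insert p.1 (comb (res.getD p.1 e) p.2)) res).items,
      Inv kv.2 := by
  induction l generalizing res with
  | nil => exact hres
  | cons p t ih =>
    refine ih _ ?_
    intro kv hkv
    rcases (PySem.Dict.mem_items_insert _ _ _ _).mp hkv with h | ⟨h, _⟩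
    · rw [h]
      refine hInvC _ _ ?_
      by_cases hc : res.contains p.1 = true
      · rcases hg : res.get? p.1 with _ | v
        · exact absurd ((PySem.Dict.get?_eq_none_iff_contains _ _).mp hg) (by simp [hc])
        · rw [PySem.Dict.getD_of_get?_eq_some res e hg]
          exact hres (p.1, v) (PySem.Dict.mem_items_of_get?_eq_some res hg)
      · rw [PySem.Dict.getD_of_not_contains res e (by simpa using hc)]
        exact hInvE
    · exact hres kv h

-- A's inner accumulation keeps the inner keys distinct
theorem inner_modify_nodup (m : List (Int × Int)) (D : PySem.Dict Int Int) (h : D.keys.Nodup) :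
    (m.foldl (fun inn q => inn.modify q.1 0 (· + q.2)) D).keys.Nodup := by
  induction m generalizing D with
  | nil => exact h
  | cons q t ih => exact ih _ (PySem.Dict.nodup_keys_insert D q.1 (D.getD q.1 0 + q.2) h)

theorem eta_pair {ν : Type} (l : List (Int × ν)) : l.map (fun kv => (kv.1, kv.2)) = l := by simp

-- A's inner accumulation loop computes exactly B's inner merge of the items
theorem inner_items (m : List (Int × Int)) (D : PySem.Dict Int Int)
    (hm : (m.map (·.1)).Nodup) (hD : D.keys.Nodup) :
    (m.foldl (fun inn q => inn.modify q.1 0 (· + q.2)) D).items = mergeInner D.items m := by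
  have h := gfold_items (fun a b => a + b) 0 id id 0 (fun a b => a + b)
      (fun _ => True) (fun _ => True) rfl (fun v w _ _ => rfl)
      (fun v => by simp) (fun v => by simp) trivial (fun _ _ _ _ => trivial)
      m D hm (fun _ _ => trivial) hD (fun _ _ => trivial)
  simp only [id_eq] at h
  rw [eta_pair, eta_pair, eta_pair] at h
  rw [mergeInner_eq]
  exact h

-- A's loop over one outer entry is a single insert of the accumulated inner dict
theorem outer_entry (k : Int) (m : List (Int × Int))
    (res : PySem.Dict Int (PySem.Dict Int Int)) (hm : m ≠ []) :
    m.foldl (fun res q =>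
        res.modify k PySem.Dict.empty (fun inn => inn.modify q.1 0 (· + q.2))) res
      = res.insert k (m.foldl (fun inn q => inn.modify q.1 0 (· + q.2))
          (res.getD k PySem.Dict.empty)) := by
  induction m generalizing res with
  | nil => exact absurd rfl hm
  | cons q t ih =>
    rw [List.foldl_cons]
    by_cases ht : t = []
    · subst ht; rfl
    · rw [ih _ ht,
        show (res.modify k PySem.Dict.empty (fun inn => inn.modify q.1 0 (· + q.2)))
          = res.insert k ((res.getD k PySem.Dict.empty).modify q.1 0 (· + q.2)) from rfl,
        PySem.Dict.insert_insert_self, PySem.Dict.getD_insert_self]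
      rfl

-- entries with an empty inner dict contribute nothing to A's pass over one dict
theorem strip_noop (d : List (Int × List (Int × Int)))
    (res : PySem.Dict Int (PySem.Dict Int Int)) :
    d.foldl (fun res p => p.2.foldl
        (fun res q => res.modify p.1 PySem.Dict.empty (fun inn => inn.modify q.1 0 (· + q.2)))
        res) res
      = (d.filter (fun p => !p.2.isEmpty)).foldl (fun res p => p.2.foldl
          (fun res q => res.modify p.1 PySem.Dict.empty (fun inn => inn.modify q.1 0 (· + q.2)))
          res) res := by
  induction d generalizing res with
  | nil => rfl
  | cons p t ih =>
    rw [List.foldl_cons, List.filter_cons]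
    by_cases hp : (!p.2.isEmpty) = true
    · rw [if_pos hp, List.foldl_cons]
      exact ih _
    · have hp2 : p.2 = [] := by
        have h2 : p.2.isEmpty = true := by simpa using hp
        exact List.isEmpty_iff.mp h2
      rw [if_neg hp, hp2]
      exact ih res

-- the main induction: A's accumulation into res, itemised, is res merged with B's result
theorem mainA (ds : List (List (Int × List (Int × Int))))
    (res : PySem.Dict Int (PySem.Dict Int Int))
    (hds : ∀ d ∈ ds, (d.map (·.1)).Nodup ∧ ∀ p ∈ d, (p.2.map (·.1)).Nodup)
    (hres : res.keys.Nodup) (hresv : ∀ kv ∈ res.items, kv.2.keys.Nodup) :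
    (ds.foldl (fun res d => d.foldl
        (fun res p => p.2.foldl
          (fun res q => res.modify p.1 PySem.Dict.empty (fun inn => inn.modify q.1 0 (· + q.2)))
          res) res) res).items.map (fun kv => (kv.1, kv.2.items))
      = pvMerge mergeInner [] (res.items.map (fun kv => (kv.1, kv.2.items)))
          (sum_2d_dicts_alt ds) := by
  induction ds generalizing res with
  | nil => exact (pvMerge_nil_right mergeInner [] mergeInner_nil_right _).symm
  | cons d ds ih =>
    obtain ⟨hdk, hdin⟩ := hds d (by simp)
    have hstrip : ((d.filter (fun p => !p.2.isEmpty)).map (·.1)).Nodup :=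
      hdk.sublist (List.Sublist.map (fun x : Int × List (Int × Int) => x.1) (List.filter_sublist (p := fun p => !p.2.isEmpty) (l := d)))
    have hPfil : ∀ p ∈ d.filter (fun p => !p.2.isEmpty), (p.2.map (·.1)).Nodup :=
      fun p hp => hdin p (List.mem_filter.mp hp).1
    have hconv : d.foldl (fun res p => p.2.foldl
          (fun res q => res.modify p.1 PySem.Dict.empty (fun inn => inn.modify q.1 0 (· + q.2)))
          res) res
        = (d.filter (fun p => !p.2.isEmpty)).foldl (fun res p =>
            res.insert p.1 (p.2.foldl (fun inn q => inn.modify q.1 0 (· + q.2))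
              (res.getD p.1 PySem.Dict.empty))) res := by
      rw [strip_noop]
      apply PySem.List.foldl_congr_mem
      intro acc p hp
      have hpne : p.2 ≠ [] := by
        have := (List.mem_filter.mp hp).2
        simpa [List.isEmpty_iff] using this
      exact outer_entry p.1 p.2 acc hpne
    rw [List.foldl_cons, hconv]
    have hres' := gfold_nodup PySem.Dict.empty
      (fun D m => m.foldl (fun inn q => inn.modify q.1 0 (· + q.2)) D)
      (d.filter (fun p => !p.2.isEmpty)) res hres
    have hresv' := gfold_inv PySem.Dict.empty
      (fun D m => m.foldl (fun inn q => inn.modify q.1 0 (· + q.2)) D)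
      (fun D => D.keys.Nodup) PySem.Dict.nodup_keys_empty
      (fun v w hv => inner_modify_nodup w v hv)
      (d.filter (fun p => !p.2.isEmpty)) res hresv
    rw [ih _ (fun d' hd' => hds d' (by simp [hd'])) hres' hresv']
    have hout := gfold_items mergeInner [] PySem.Dict.items id PySem.Dict.empty
        (fun D m => m.foldl (fun inn q => inn.modify q.1 0 (· + q.2)) D)
        (fun D => D.keys.Nodup) (fun m => (m.map (·.1)).Nodup)
        rfl (fun v w hv hw => inner_items w v hw hv)
        mergeInner_nil_right mergeInner_nil_left PySem.Dict.nodup_keys_empty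
        (fun v w hv _ => inner_modify_nodup w v hv)
        (d.filter (fun p => !p.2.isEmpty)) res hstrip hPfil hres hresv
    simp only [id_eq] at hout
    rw [eta_pair] at hout
    rw [hout,
      show sum_2d_dicts_alt (d :: ds)
        = pvMerge mergeInner [] (d.filter (fun p => !p.2.isEmpty)) (sum_2d_dicts_alt ds)
        from congrArg₂ (pvMerge mergeInner []) rfl rfl]
    exact pvMerge_assoc mergeInner [] mergeInner_nil_left mergeInner_assoc _ _ _

-- ===== VERDICT (by name: the statement is the Claim_ definition above) =====
theorem sum_2d_dicts_spec : Claim_equal_sum_2d_dicts := by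
  intro dicts _ hpre
  unfold Spec_sum_2d_dicts
  have h := mainA dicts PySem.Dict.empty hpre PySem.Dict.nodup_keys_empty
    (by intro kv hkv; cases hkv)
  show sum_2d_dicts dicts = sum_2d_dicts_alt dicts
  rw [show sum_2d_dicts dicts
      = pvMerge mergeInner []
          (((PySem.Dict.empty : PySem.Dict Int (PySem.Dict Int Int)).items).map
            (fun kv => (kv.1, kv.2.items)))
          (sum_2d_dicts_alt dicts) from h]
  exact pvMerge_nil_left mergeInner [] _
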